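-- pv_equiv track=rewrite | github.com/Aditya12320/RedditUserPersonaGenerator | persona_template.py | _infer_motivations
-- ===== SOURCE A (Python) =====
-- from typing import List, Dict, Tuple
--
-- def _infer_motivations(items: List[Dict]) -> List[str]:
--     """Enhanced motivation inference."""
--     motivations = []
--     motivation_keywords = {
--         'Learning': ['learn', 'study', 'read', 'knowledge'],
--         'Helping': ['help', 'advice', 'suggest'],
--         'Sharing': ['share', 'tell', 'story'],
--         'Entertainment': ['fun', 'game', 'movie', 'music']
--     }
--
--     for item in items:
--         text = item.get('text', '').lower()
--         for mot, keywords in motivation_keywords.items():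
--             if any(kw in text for kw in keywords) and mot not in motivations:
--                 motivations.append(mot)
--
--     return motivations or ["Unknown"]
-- ===== SOURCE B (Python) =====
-- def _infer_motivations(items):
--     """Enhanced motivation inference (index-table decomposition)."""
--     motivation_keywords = {
--         'Learning': ['learn', 'study', 'read', 'knowledge'],
--         'Helping': ['help', 'advice', 'suggest'],
--         'Sharing': ['share', 'tell', 'story'],
--         'Entertainment': ['fun', 'game', 'movie', 'music']
--     }
--     texts = [item.get('text', '').lower() for item in items]
--
--     def first_hit(kws):
--         return next((i for i, t in enumerate(texts) if any(kw in t for kw in kws)), None)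
--
--     firsts = {mot: first_hit(kws) for mot, kws in motivation_keywords.items()}
--     result = [mot for i in range(len(texts)) for mot in motivation_keywords if firsts[mot] == i]
--     return result or ["Unknown"]
-- ===== Notes on version B (the rewrite author's own statement) =====
-- stated objective: alternative
-- what changed: A appends each motivation to an accumulator the first time any item matches it; B instead computes, per motivation, the index of the first matching item (a first-hit table) and then emits motivations bucket-by-bucket over the item indices, which reproduces A's first-seen order without any membership-in-accumulator bookkeeping.
import Mathlib
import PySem

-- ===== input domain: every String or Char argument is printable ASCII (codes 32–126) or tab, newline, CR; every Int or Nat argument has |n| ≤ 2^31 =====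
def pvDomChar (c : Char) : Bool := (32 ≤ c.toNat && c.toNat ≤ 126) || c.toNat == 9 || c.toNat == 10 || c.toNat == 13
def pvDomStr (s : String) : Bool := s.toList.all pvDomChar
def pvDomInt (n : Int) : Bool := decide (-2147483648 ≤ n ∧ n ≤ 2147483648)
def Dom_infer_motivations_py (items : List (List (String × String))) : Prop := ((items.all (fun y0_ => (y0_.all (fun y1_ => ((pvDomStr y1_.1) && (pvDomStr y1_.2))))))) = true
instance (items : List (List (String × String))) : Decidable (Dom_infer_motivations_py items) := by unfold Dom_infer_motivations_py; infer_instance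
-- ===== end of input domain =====

-- B replaces A's incremental append-on-first-seen loop by a per-motivation first-match
-- index table emitted bucket-by-bucket over the item indices (alternative decomposition,
-- same asymptotic cost); return values proved equal on all inputs.

-- ===== PORT A =====
-- the keyword table both Python versions contain literally
def pvMotKeys : List (String × List String) :=
  [("Learning", ["learn", "study", "read", "knowledge"]),
   ("Helping", ["help", "advice", "suggest"]),
   ("Sharing", ["share", "tell", "story"]),
   ("Entertainment", ["fun", "game", "movie", "music"])]

-- item.get('text', '').lower()
def pvText (item : List (String × String)) : String :=
  PySem.Str.lower ((PySem.Dict.mk item).getD "text" "")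

def infer_motivations_py (items : List (List (String × String))) : List String :=
  let motivations := items.foldl (fun acc item =>
    let text := pvText item
    pvMotKeys.foldl (fun acc p =>
      if (p.2.any (fun kw => PySem.Str.isIn kw text)) && !(acc.contains p.1) then
        acc ++ [p.1]
      else acc) acc) []
  if motivations = [] then ["Unknown"] else motivations

-- ===== PORT B =====
-- first_hit(kws) = next((i for i, t in enumerate(texts) if any(kw in t for kw in kws)), None)
def pvFirstHit (texts : List String) (kws : List String) : Option Int :=
  ((PySem.List.enumerate texts 0).find? (fun q => kws.any (fun kw => PySem.Str.isIn kw q.2))).map (fun q => q.1)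

def infer_motivations_py_alt (items : List (List (String × String))) : List String :=
  let texts := items.map pvText
  let firsts : PySem.Dict String (Option Int) :=
    PySem.Dict.ofList (pvMotKeys.map (fun p => (p.1, pvFirstHit texts p.2)))
  let result := (PySem.List.pyRange 0 (texts.length : Int) 1).flatMap (fun i =>
    (pvMotKeys.map (fun p => p.1)).filter (fun m => firsts.getD m none == some i))
  if result = [] then ["Unknown"] else result

-- ===== PRECONDITION & SPEC =====
def Spec_infer_motivations_py (items : List (List (String × String))) (out : List String) : Prop := out = infer_motivations_py_alt items
instance (items : List (List (String × String))) (out : List String) : Decidable (Spec_infer_motivations_py items out) := by unfold Spec_infer_motivations_py; infer_instance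

-- ===== CLAIM (what is proved, stated in full; the proofs are below) =====
def Claim_equal_infer_motivations_py : Prop := ∀ (items : List (List (String × String))), Dom_infer_motivations_py items → Spec_infer_motivations_py items (infer_motivations_py items)

-- ===== LEMMAS AND PROOFS =====

-- does the text t match motivation row p
def pvPred (p : String × List String) (t : String) : Bool := p.2.any (fun kw => PySem.Str.isIn kw t)

-- index of the first matching text (recursive reference form)
def pvFf (p : String × List String) : List String → Option Nat
  | [] => none
  | t :: ts => if pvPred p t then some 0 else (pvFf p ts).map (· + 1)

-- A's loop body, abstracted over the text
def pvStep (acc : List String) (t : String) : List String :=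
  pvMotKeys.foldl (fun acc p => if pvPred p t && !(acc.contains p.1) then acc ++ [p.1] else acc) acc

def pvCoreA (ts : List String) : List String := ts.foldl pvStep []

def pvFirsts (ts : List String) : PySem.Dict String (Option Int) :=
  PySem.Dict.ofList (pvMotKeys.map (fun p => (p.1, pvFirstHit ts p.2)))

def pvCoreB (ts : List String) : List String :=
  (PySem.List.pyRange 0 (ts.length : Int) 1).flatMap (fun i =>
    (pvMotKeys.map (fun p => p.1)).filter (fun m => (pvFirsts ts).getD m none == some i))

theorem pvFirstHit_eq_ff (p : String × List String) (ts : List String) :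
    pvFirstHit ts p.2 = (pvFf p ts).map (fun k => (k : Int)) := by
  have key : ∀ (ts : List String) (s : Int),
      ((PySem.List.enumerate ts s).find? (fun q => p.2.any (fun kw => PySem.Str.isIn kw q.2))).map (fun q => q.1)
        = (pvFf p ts).map (fun k => s + (k : Int)) := by
    intro ts
    induction ts with
    | nil => intro s; simp [PySem.List.enumerate_nil, pvFf]
    | cons t ts ih =>
      intro s
      rw [PySem.List.enumerate_cons]
      by_cases h : pvPred p t
      · have h2 : (p.2.any fun kw => PySem.Chars.isIn kw.toList t.toList) = true := by
          simpa [pvPred, PySem.Str.isIn] using h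
        simp [h2, pvFf, h]
      · have h3 : (p.2.any fun kw => PySem.Str.isIn kw t) = false := by
          simpa [pvPred] using h
        simp only [List.find?_cons, pvFf, if_neg h, h3]
        rw [ih (s + 1)]
        cases pvFf p ts with
        | none => simp
        | some k => simp; ring
  simpa [pvFirstHit] using key ts 0

theorem pvFf_lt_length (p : String × List String) (ts : List String) (k : Nat)
    (h : pvFf p ts = some k) : k < ts.length := by
  induction ts generalizing k with
  | nil => simp [pvFf] at h
  | cons t ts ih =>
    by_cases hp : pvPred p t
    · simp [pvFf, hp] at h
      simp only [List.length_cons]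
      omega
    · simp [pvFf, hp] at h
      obtain ⟨j, hj, rfl⟩ := h
      have := ih j hj
      simp only [List.length_cons]
      omega

theorem pvFf_append_singleton (p : String × List String) (ts : List String) (t : String) :
    pvFf p (ts ++ [t]) =
      (pvFf p ts).orElse (fun _ => if pvPred p t then some ts.length else none) := by
  induction ts with
  | nil => simp [pvFf, Option.orElse]
  | cons u ts ih =>
    by_cases hp : pvPred p u
    · simp [pvFf, hp, Option.orElse]
    · simp only [List.cons_append, pvFf, if_neg hp, ih, List.length_cons]
      cases h : pvFf p ts with
      | none => by_cases hq : pvPred p t <;> simp [hq, Option.orElse]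
      | some k => simp [Option.orElse]

-- A's inner loop appends exactly the names of the newly matched table rows
theorem pvStep_eq (acc : List String) (t : String) :
    pvStep acc t = acc ++ (pvMotKeys.filter (fun p => pvPred p t && !(acc.contains p.1))).map (fun p => p.1) := by
  have gen : ∀ (ms : List (String × List String)), ms.Pairwise (fun a b => a.1 ≠ b.1) →
      ∀ acc, ms.foldl (fun acc p => if pvPred p t && !(acc.contains p.1) then acc ++ [p.1] else acc) acc
        = acc ++ (ms.filter (fun p => pvPred p t && !(acc.contains p.1))).map (fun p => p.1) := by
    intro ms hnd
    induction ms with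
    | nil => intro acc; simp
    | cons p ms ih =>
      intro acc
      have hne : ∀ q ∈ ms, q.1 ≠ p.1 := fun q hq =>
        Ne.symm ((List.pairwise_cons.mp hnd).1 q hq)
      have hnd' := (List.pairwise_cons.mp hnd).2
      by_cases hc : (pvPred p t && !(acc.contains p.1)) = true
      · simp only [List.foldl_cons, List.filter_cons, hc, if_true]
        rw [ih hnd' (acc ++ [p.1])]
        have hfc : (ms.filter (fun q => pvPred q t && !((acc ++ [p.1]).contains q.1)))
            = ms.filter (fun q => pvPred q t && !(acc.contains q.1)) := by
          apply List.filter_congr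
          intro q hq
          have hcc : ((acc ++ [p.1]).contains q.1) = (acc.contains q.1) := by
            simp [hne q hq]
          rw [hcc]
        rw [hfc]; simp
      · have hc' : (pvPred p t && !(acc.contains p.1)) = false := by simpa using hc
        simp only [List.foldl_cons, List.filter_cons, hc', Bool.false_eq_true, if_false]
        rw [ih hnd' acc]
  exact gen pvMotKeys (by decide) acc

-- the first-index table looks up each motivation name to its own first-hit value
theorem pvFirsts_getD (ts : List String) (p : String × List String) (hp : p ∈ pvMotKeys) :
    (pvFirsts ts).getD p.1 none = pvFirstHit ts p.2 := by
  fin_cases hp <;>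
    simp [pvFirsts, pvMotKeys, PySem.Dict.ofList, PySem.Dict.update, PySem.Dict.getD_insert]

-- names determine rows in the concrete table
theorem pvMotKeys_inj : ∀ p ∈ pvMotKeys, ∀ q ∈ pvMotKeys, q.1 = p.1 → q = p := by decide

-- a bucket below the new index is unchanged by appending one more text
theorem pvHit_append_lt (p : String × List String) (ts : List String) (t : String) (i : Int)
    (hi : i < (ts.length : Int)) :
    ((pvFirstHit (ts ++ [t]) p.2 == some i)) = ((pvFirstHit ts p.2 == some i)) := by
  rw [pvFirstHit_eq_ff, pvFirstHit_eq_ff, pvFf_append_singleton]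
  cases h : pvFf p ts with
  | some k => simp [Option.orElse]
  | none =>
    by_cases hq : pvPred p t
    · have hne : ((ts.length : Int)) ≠ i := by omega
      simp [Option.orElse, hq, hne]
    · simp [Option.orElse, hq]

-- the new bucket is exactly what A's step appends
theorem pvHit_append_self (p : String × List String) (ts : List String) (t : String) :
    ((pvFirstHit (ts ++ [t]) p.2 == some (ts.length : Int)))
      = (pvPred p t && !((pvFf p ts).isSome)) := by
  rw [pvFirstHit_eq_ff, pvFf_append_singleton]
  cases h : pvFf p ts with
  | some k =>
    have hk := pvFf_lt_length p ts k h
    simp only [Option.orElse, Option.map, Option.isSome]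
    have hne : ¬ ((k : Int) = (ts.length : Int)) := by omega
    simp [hne]
  | none =>
    by_cases hq : pvPred p t <;> simp [Option.orElse, hq]

-- the two loop shapes agree, with the invariant that a motivation is in A's
-- accumulator iff some text so far matches it
theorem pvMaster (ts : List String) :
    pvCoreA ts = pvCoreB ts ∧
    ∀ p ∈ pvMotKeys, ((pvCoreA ts).contains p.1) = (pvFf p ts).isSome := by
  induction ts using List.reverseRecOn with
  | nil =>
    constructor
    · simp [pvCoreA, pvCoreB, PySem.List.pyRange_one_eq_nil]
    · intro p hp; simp [pvCoreA, pvFf]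
  | append_singleton ts t ih =>
    obtain ⟨ihA, ihC⟩ := ih
    set apdx := (pvMotKeys.filter (fun p => pvPred p t && !((pvFf p ts).isSome))).map (fun p => p.1) with hapdx
    have hA : pvCoreA (ts ++ [t]) = pvCoreA ts ++ apdx := by
      have h1 : pvCoreA (ts ++ [t]) = pvStep (pvCoreA ts) t := by
        simp [pvCoreA]
      rw [h1, pvStep_eq, hapdx]
      congr 2
      apply List.filter_congr
      intro p hp
      rw [ihC p hp]
    have hB : pvCoreB (ts ++ [t]) = pvCoreB ts ++ apdx := by
      have hlast : PySem.List.pyRange ((ts.length : Int)) ((ts.length : Int) + 1) 1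
          = [(ts.length : Int)] := by
        rw [PySem.List.pyRange_one_cons (by omega), PySem.List.pyRange_one_eq_nil (by omega)]
      have hsplit : PySem.List.pyRange 0 (((ts ++ [t]).length : Int)) 1
          = PySem.List.pyRange 0 (ts.length : Int) 1 ++ [(ts.length : Int)] := by
        have hlen : (((ts ++ [t]).length : Int)) = (ts.length : Int) + 1 := by
          simp
        rw [hlen, PySem.List.pyRange_one_append 0 (ts.length : Int) ((ts.length : Int) + 1)
              (by omega) (by omega), hlast]
      rw [pvCoreB, hsplit, List.flatMap_append]
      congr 1
      · rw [pvCoreB]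
        apply List.flatMap_congr
        intro i hi
        have hi2 : i < (ts.length : Int) := ((PySem.List.mem_pyRange_one).mp hi).2
        rw [List.filter_map, List.filter_map]
        congr 1
        apply List.filter_congr
        intro p hp
        simp only [Function.comp]
        rw [pvFirsts_getD _ p hp, pvFirsts_getD _ p hp, pvHit_append_lt p ts t i hi2]
      · simp only [List.flatMap_cons, List.flatMap_nil, List.append_nil]
        rw [List.filter_map, hapdx]
        congr 1
        apply List.filter_congr
        intro p hp
        simp only [Function.comp]
        rw [pvFirsts_getD _ p hp, pvHit_append_self]
    have hC : ∀ p ∈ pvMotKeys, ((pvCoreA (ts ++ [t])).contains p.1) = (pvFf p (ts ++ [t])).isSome := by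
      intro p hp
      rw [hA, List.contains_append, ihC p hp, pvFf_append_singleton]
      have hiff : (p.1 ∈ apdx) ↔ ((pvPred p t && !((pvFf p ts).isSome)) = true) := by
        rw [hapdx]
        constructor
        · intro hmem
          simp only [List.mem_map, List.mem_filter] at hmem
          obtain ⟨q, ⟨hqm, hqc⟩, hq1⟩ := hmem
          rwa [pvMotKeys_inj p hp q hqm hq1] at hqc
        · intro hc
          exact List.mem_map_of_mem (List.mem_filter.mpr ⟨hp, hc⟩)
      have happx : (apdx.contains p.1) = (pvPred p t && !((pvFf p ts).isSome)) := by
        rw [Bool.eq_iff_iff]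
        rw [List.contains_iff_mem]
        exact hiff
      rw [happx]
      cases h : pvFf p ts with
      | some k => simp [Option.orElse]
      | none => by_cases hq : pvPred p t <;> simp [Option.orElse, hq]
    exact ⟨by rw [hA, hB, ihA], hC⟩

-- ===== VERDICT (by name: the statement is the Claim_ definition above) =====
theorem infer_motivations_py_spec : Claim_equal_infer_motivations_py := by
  intro items _
  unfold Spec_infer_motivations_py
  show infer_motivations_py items = infer_motivations_py_alt items
  unfold infer_motivations_py infer_motivations_py_alt
  have hfold : items.foldl (fun acc item =>
      pvMotKeys.foldl (fun acc p =>
        if (p.2.any (fun kw => PySem.Str.isIn kw (pvText item))) && !(acc.contains p.1) then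
          acc ++ [p.1] else acc) acc) []
      = pvCoreA (items.map pvText) := by
    rw [pvCoreA, List.foldl_map]
    rfl
  rw [hfold, (pvMaster (items.map pvText)).1]
  rfl
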